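-- pv_equiv track=rewrite | github.com/satyamskillz/DSA-Course | Week-2 Algorithmic Warmup/8_last_digit_of_the_sum_of_squares_of_fibonacci_numbers/fibonacci_sum_squares.py | squ
-- ===== SOURCE A (Python) =====
-- def squ(index):
--     f=[0,1]
--     s=[0,1]
--     a=[0,1]
--     for i in range(2, index+1):
--         f.append((f[i-1]+f[i-2])%10)
--         s.append((f[i]**2)%10)
--         a.append((a[i-1]+s[i])%10)
--     return a
-- ===== SOURCE B (Python) =====
-- def squ(index):
--     # Identity: sum_{k<=n} F(k)^2 = F(n)*F(n+1); keep only two Fibonacci last digits.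
--     a = [0, 1]
--     fi, fi1 = 1, 2  # F(2) % 10, F(3) % 10
--     for _ in range(2, index + 1):
--         a.append((fi * fi1) % 10)
--         fi, fi1 = fi1, (fi + fi1) % 10
--     return a
-- ===== Notes on version B (the rewrite author's own statement) =====
-- stated objective: simpler
-- what changed: Replaces the three growing lists (Fibonacci digits, square digits, running sum of squares) by the identity sum F(k)^2 = F(n)F(n+1): only two Fibonacci last digits are kept in O(1) state and each output element is their product mod 10.
import Mathlib
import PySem

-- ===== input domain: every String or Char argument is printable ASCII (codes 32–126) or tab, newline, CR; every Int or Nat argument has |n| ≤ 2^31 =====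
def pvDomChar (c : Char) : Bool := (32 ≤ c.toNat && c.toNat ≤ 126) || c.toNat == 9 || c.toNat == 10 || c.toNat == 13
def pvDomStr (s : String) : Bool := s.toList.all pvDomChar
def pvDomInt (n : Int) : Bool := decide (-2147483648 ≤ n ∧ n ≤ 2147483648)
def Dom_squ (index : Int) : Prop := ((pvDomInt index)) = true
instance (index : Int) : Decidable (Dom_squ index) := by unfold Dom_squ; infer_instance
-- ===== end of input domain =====

-- B replaces A's three growing lists by the identity sum F(k)^2 = F(n)*F(n+1),
-- keeping only two Fibonacci last digits (objective: simpler).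


-- ===== PORT A =====
-- loop body of A; list indices i-1, i-2, i are always in range, so pyGetD's default is never used
def squStep (st : List Int × List Int × List Int) (i : Int) : List Int × List Int × List Int :=
  let f := st.1 ++ [PySem.Int.mod (PySem.List.pyGetD st.1 (i - 1) 0 + PySem.List.pyGetD st.1 (i - 2) 0) 10]
  let s := st.2.1 ++ [PySem.Int.mod (PySem.List.pyGetD f i 0 ^ 2) 10]
  let a := st.2.2 ++ [PySem.Int.mod (PySem.List.pyGetD st.2.2 (i - 1) 0 + PySem.List.pyGetD s i 0) 10]
  (f, s, a)

def squ (index : Int) : List Int :=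
  ((PySem.List.pyRange 2 (index + 1) 1).foldl squStep ([0, 1], [0, 1], [0, 1])).2.2

-- ===== PORT B =====
-- loop body of B: state = (a, fi, fi1)
def squAltStep (st : List Int × Int × Int) (_i : Int) : List Int × Int × Int :=
  (st.1 ++ [PySem.Int.mod (st.2.1 * st.2.2) 10], st.2.2, PySem.Int.mod (st.2.1 + st.2.2) 10)

def squ_alt (index : Int) : List Int :=
  ((PySem.List.pyRange 2 (index + 1) 1).foldl squAltStep ([0, 1], 1, 2)).1

-- ===== PRECONDITION & SPEC =====
def Spec_squ (index : Int) (out : List Int) : Prop := out = squ_alt index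
instance (index : Int) (out : List Int) : Decidable (Spec_squ index out) := by unfold Spec_squ; infer_instance

-- ===== CLAIM (what is proved, stated in full; the proofs are below) =====
def Claim_equal_squ : Prop := ∀ (index : Int), Dom_squ index → Spec_squ index (squ index)

-- ===== LEMMAS AND PROOFS =====

-- Fibonacci as an Int, and the three digit lists A maintains
def pvF (n : Nat) : Int := Nat.fib n

theorem pvF_add_two (n : Nat) : pvF (n + 2) = pvF n + pvF (n + 1) := by
  simp [pvF, Nat.fib_add_two]

def pvFL (m : Nat) : List Int := (List.range m).map (fun n => PySem.Int.mod (pvF n) 10)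
def pvSL (m : Nat) : List Int := (List.range m).map (fun n => PySem.Int.mod (pvF n * pvF n) 10)
def pvAL (m : Nat) : List Int := (List.range m).map (fun n => PySem.Int.mod (pvF n * pvF (n + 1)) 10)

theorem pv_mod10 (a : Int) : PySem.Int.mod a 10 = a % 10 :=
  PySem.Int.mod_eq_emod_of_pos (by norm_num)

theorem pv_getD_map_range (g : Nat → Int) (m n : Nat) (h : n < m) :
    PySem.List.pyGetD ((List.range m).map g) ((n : Nat) : Int) 0 = g n := by
  rw [PySem.List.pyGetD_natCast]
  rw [List.getD_eq_getElem?_getD]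
  simp [h]

theorem pv_getD_FL (m n : Nat) (h : n < m) :
    PySem.List.pyGetD (pvFL m) ((n : Nat) : Int) 0 = PySem.Int.mod (pvF n) 10 :=
  pv_getD_map_range _ m n h

theorem pv_getD_SL (m n : Nat) (h : n < m) :
    PySem.List.pyGetD (pvSL m) ((n : Nat) : Int) 0 = PySem.Int.mod (pvF n * pvF n) 10 :=
  pv_getD_map_range _ m n h

theorem pv_getD_AL (m n : Nat) (h : n < m) :
    PySem.List.pyGetD (pvAL m) ((n : Nat) : Int) 0 = PySem.Int.mod (pvF n * pvF (n + 1)) 10 :=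
  pv_getD_map_range _ m n h

theorem pv_invA (t : Nat) :
    (PySem.List.pyRange 2 (2 + (t : Int)) 1).foldl squStep ([0, 1], [0, 1], [0, 1])
      = (pvFL (t + 2), pvSL (t + 2), pvAL (t + 2)) := by
  induction t with
  | zero =>
      rw [PySem.List.pyRange_one_eq_nil (by omega)]
      decide
  | succ t ih =>
      have h2 : (2 : Int) + ((t : Int) + 1) = (2 + (t : Int)) + 1 := by ring
      rw [show ((t + 1 : Nat) : Int) = (t : Int) + 1 by omega, h2,
        PySem.List.pyRange_one_succ_right (by omega), List.foldl_append, ih]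
      simp only [List.foldl_cons, List.foldl_nil, squStep]
      have hi : (2 + (t : Int)) = ((t + 2 : Nat) : Int) := by push_cast; ring
      have hi1 : (2 + (t : Int)) - 1 = ((t + 1 : Nat) : Int) := by push_cast; ring
      have hi2 : (2 + (t : Int)) - 2 = ((t : Nat) : Int) := by omega
      rw [hi1, hi2, hi]
      rw [pv_getD_FL _ _ (by omega), pv_getD_FL _ _ (by omega), pv_getD_AL _ _ (by omega)]
      have hfnew : PySem.Int.mod (PySem.Int.mod (pvF (t + 1)) 10 + PySem.Int.mod (pvF t) 10) 10
          = PySem.Int.mod (pvF (t + 2)) 10 := by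
        simp only [pv_mod10]
        rw [← Int.add_emod, pvF_add_two]
        ring_nf
      rw [hfnew]
      have hfl : pvFL (t + 2) ++ [PySem.Int.mod (pvF (t + 2)) 10] = pvFL (t + 3) := by
        simp [pvFL, List.range_succ]
      rw [hfl, pv_getD_FL _ _ (by omega)]
      have hsnew : PySem.Int.mod (PySem.Int.mod (pvF (t + 2)) 10 ^ 2) 10
          = PySem.Int.mod (pvF (t + 2) * pvF (t + 2)) 10 := by
        simp only [pv_mod10, pow_two]
        rw [← Int.mul_emod]
      rw [hsnew]
      have hsl : pvSL (t + 2) ++ [PySem.Int.mod (pvF (t + 2) * pvF (t + 2)) 10] = pvSL (t + 3) := by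
        simp [pvSL, List.range_succ]
      rw [hsl, pv_getD_SL _ _ (by omega)]
      have hanew : PySem.Int.mod (PySem.Int.mod (pvF (t + 1) * pvF (t + 1 + 1)) 10
            + PySem.Int.mod (pvF (t + 2) * pvF (t + 2)) 10) 10
          = PySem.Int.mod (pvF (t + 2) * pvF (t + 2 + 1)) 10 := by
        simp only [pv_mod10]
        rw [← Int.add_emod]
        have : pvF (t + 1) * pvF (t + 1 + 1) + pvF (t + 2) * pvF (t + 2)
            = pvF (t + 2) * pvF (t + 2 + 1) := by
          have h3 : pvF (t + 3) = pvF (t + 1) + pvF (t + 2) := pvF_add_two (t + 1)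
          show pvF (t + 1) * pvF (t + 2) + pvF (t + 2) * pvF (t + 2) = pvF (t + 2) * pvF (t + 3)
          rw [h3]; ring
        rw [this]
      rw [hanew]
      have hal : pvAL (t + 2) ++ [PySem.Int.mod (pvF (t + 2) * pvF (t + 2 + 1)) 10] = pvAL (t + 3) := by
        simp [pvAL, List.range_succ]
      rw [hal]

theorem pv_invB (t : Nat) :
    (PySem.List.pyRange 2 (2 + (t : Int)) 1).foldl squAltStep ([0, 1], 1, 2)
      = (pvAL (t + 2), PySem.Int.mod (pvF (t + 2)) 10, PySem.Int.mod (pvF (t + 3)) 10) := by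
  induction t with
  | zero =>
      rw [PySem.List.pyRange_one_eq_nil (by omega)]
      decide
  | succ t ih =>
      have h2 : (2 : Int) + ((t : Int) + 1) = (2 + (t : Int)) + 1 := by ring
      rw [show ((t + 1 : Nat) : Int) = (t : Int) + 1 by omega, h2,
        PySem.List.pyRange_one_succ_right (by omega), List.foldl_append, ih]
      simp only [List.foldl_cons, List.foldl_nil]
      show squAltStep _ _ = _
      unfold squAltStep
      refine congrArg₂ _ ?_ (congrArg₂ _ rfl ?_)
      · have : PySem.Int.mod (PySem.Int.mod (pvF (t + 2)) 10 * PySem.Int.mod (pvF (t + 3)) 10) 10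
            = PySem.Int.mod (pvF (t + 2) * pvF (t + 2 + 1)) 10 := by
          simp only [pv_mod10]
          rw [← Int.mul_emod]
        rw [this]
        simp [pvAL, List.range_succ]
      · simp only [pv_mod10]
        rw [← Int.add_emod, ← pvF_add_two (t + 2)]

theorem squ_spec : Claim_equal_squ := by
  intro index _
  unfold Spec_squ squ squ_alt
  by_cases h : 1 ≤ index
  · have ht : index + 1 = 2 + (((index - 1).toNat : Nat) : Int) := by omega
    rw [ht, pv_invA, pv_invB]
  · rw [PySem.List.pyRange_one_eq_nil (by omega)]
    rfl
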